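-- pv_equiv track=rewrite | github.com/gtaylor/dockerized-image-crawler | crawler/webapi_service/lib/url_parse_fsm.py | parse_linebreakless_url_str
-- ===== SOURCE A (Python) =====
-- def parse_linebreakless_url_str(url_str):
--     """
--     Muddle through a string that contains at least one properly formed URL.
--     The example submission method results in the URLs running into one long,
--     un-delimited string.
--
--     Rather than require our example user to send linebreaks, we'll just try
--     to parse these as best we can.
--
--     :param str url_str: A string containing at least one valid URL.
--     :rtype: set
--     :returns: A set of URLs found within the string.
--     """
--
--     split_body = url_str.split('/')
--     urls_to_crawl = set()
--     current_urlstr = ''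
--     is_in_initial_state = True
--
--     for tok in split_body:
--         if not tok:
--             continue
--
--         if is_in_initial_state and tok not in ['http:', 'https:']:
--             raise ValueError("URLs must start with a protocol string.")
--
--         if tok in ['http:', 'https:']:
--             if current_urlstr:
--                 # We already had a URL in the cooker, send it off.
--                 urls_to_crawl.add(current_urlstr)
--
--             current_urlstr = tok + '//'
--             is_in_initial_state = False
--         else:
--             current_urlstr += tok
--
--     # If we had a URL in the buffer at the end of the loop, send it along.
--     if current_urlstr and _is_fully_baked_url(current_urlstr):
--         urls_to_crawl.add(current_urlstr)
--
--     return urls_to_crawl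
--
-- def _is_fully_baked_url(url_str):
--     """
--     :param str url_str: The URL to spot check.
--     :rtype: bool
--     :returns: True if ``url_str`` appears to be a fully-formed URL.
--     """
--
--     return url_str not in ['http://', 'https://']
-- ===== SOURCE B (Python) =====
-- def parse_linebreakless_url_str(url_str):
--     """Two-phase re-implementation: drop empty '/'-tokens, then segment the
--     token list at protocol tokens and build each segment's URL."""
--     toks = [t for t in url_str.split('/') if t]
--     if not toks:
--         return set()
--     if toks[0] not in ('http:', 'https:'):
--         raise ValueError("URLs must start with a protocol string.")
--     groups = _segments(toks[0], toks[1:])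
--     urls = {proto + '//' + body for proto, body in groups[:-1]}
--     proto, body = groups[-1]
--     if body:
--         urls.add(proto + '//' + body)
--     return urls
--
-- def _segments(proto, rest):
--     """Split rest into (protocol, joined-body) segments; proto heads the first."""
--     body = ''
--     i = 0
--     while i < len(rest) and rest[i] not in ('http:', 'https:'):
--         body += rest[i]
--         i += 1
--     if i == len(rest):
--         return [(proto, body)]
--     return [(proto, body)] + _segments(rest[i], rest[i + 1:])
-- ===== Notes on version B (the rewrite author's own statement) =====
-- stated objective: alternative
-- what changed: Replaces the single-pass flush-on-protocol state machine (buffer string + initial-state flag) by a two-phase computation: filter out empty slash-separated tokens, recursively segment the token list at protocol tokens, then build one URL per segment, adding the last segment's URL only when it has a non-empty body.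
import Mathlib
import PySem

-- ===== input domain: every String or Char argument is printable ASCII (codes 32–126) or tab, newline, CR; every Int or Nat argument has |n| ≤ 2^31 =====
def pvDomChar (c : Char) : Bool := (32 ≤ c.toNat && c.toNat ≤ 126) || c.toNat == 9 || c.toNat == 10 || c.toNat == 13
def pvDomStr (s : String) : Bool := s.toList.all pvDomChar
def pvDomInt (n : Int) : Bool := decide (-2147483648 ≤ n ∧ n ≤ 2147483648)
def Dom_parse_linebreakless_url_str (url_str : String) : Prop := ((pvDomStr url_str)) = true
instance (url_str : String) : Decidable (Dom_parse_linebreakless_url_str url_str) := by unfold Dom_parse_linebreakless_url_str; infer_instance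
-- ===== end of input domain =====

-- B replaces A's flush-on-protocol state machine by filter-then-segment-then-build; equivalence on inputs
-- where A does not raise (first non-empty slash-separated token is a protocol token), stated by Pre_.

-- ===== PORT A =====
-- tok in ['http:', 'https:']  (used by both Pythons verbatim)
def pvIsProto (t : List Char) : Bool := t = "http:".toList ∨ t = "https:".toList

-- the for-loop of A: state = (urls_to_crawl, current_urlstr, is_in_initial_state); none = ValueError
def pvLoopA : List (List Char) → PySem.Set String → List Char → Bool → Option (PySem.Set String × List Char)
  | [], urls, cur, _ => some (urls, cur)
  | t :: rest, urls, cur, init =>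
    if t = [] then pvLoopA rest urls cur init
    else if init = true ∧ pvIsProto t = false then none
    else if pvIsProto t = true then
      pvLoopA rest (if cur ≠ [] then PySem.Set.add urls (String.ofList cur) else urls) (t ++ "//".toList) false
    else pvLoopA rest urls (cur ++ t) init

-- _is_fully_baked_url
def pvIsFullyBaked (cur : List Char) : Bool :=
  decide (¬ (cur = "http://".toList ∨ cur = "https://".toList))

def parse_linebreakless_url_str (url_str : String) : List String :=
  match pvLoopA (PySem.Chars.splitOn url_str.toList "/".toList) PySem.Set.empty [] true with
  | none => []   -- ValueError (excluded by Pre_)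
  | some (urls, cur) =>
    if cur ≠ [] ∧ pvIsFullyBaked cur = true then PySem.Set.add urls (String.ofList cur) else urls

-- ===== PORT B =====
-- the while-loop of _segments: collect body tokens up to the next protocol token, return (joined body, remainder)
def pvTakeBody : List (List Char) → List Char × List (List Char)
  | [] => ([], [])
  | t :: r =>
    if pvIsProto t = true then ([], t :: r)
    else
      let p := pvTakeBody r
      (t ++ p.1, p.2)

theorem pvTakeBody_len (l : List (List Char)) : (pvTakeBody l).2.length ≤ l.length := by
  induction l with
  | nil => simp [pvTakeBody]
  | cons t r ih =>
    simp only [pvTakeBody]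
    split
    · simp
    · simpa using Nat.le_succ_of_le ih

-- _segments
def pvSegments (proto : List Char) (rest : List (List Char)) : List (List Char × List Char) :=
  let t := pvTakeBody rest
  if h : t.2 = [] then [(proto, t.1)]
  else (proto, t.1) :: pvSegments (t.2.head h) t.2.tail
termination_by rest.length
decreasing_by
  have h1 := pvTakeBody_len rest
  have h2 : (pvTakeBody rest).2.length ≠ 0 := by simpa using h
  have := List.length_tail (l := (pvTakeBody rest).2)
  omega

def pvRender (g : List Char × List Char) : String := String.ofList (g.1 ++ "//".toList ++ g.2)

def parse_linebreakless_url_str_alt (url_str : String) : List String :=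
  match (PySem.Chars.splitOn url_str.toList "/".toList).filter (fun t => t ≠ []) with
  | [] => PySem.Set.empty
  | p :: rest =>
    if pvIsProto p = false then []  -- ValueError (excluded by Pre_)
    else
      let gs := pvSegments p rest
      let urls := PySem.Set.ofList (gs.dropLast.map pvRender)
      match gs.getLast? with
      | some (q, b) => if b ≠ [] then PySem.Set.add urls (String.ofList (q ++ "//".toList ++ b)) else urls
      | none => urls

-- ===== PRECONDITION & SPEC =====
-- Pre_ excludes exactly the inputs on which A raises ValueError (first non-empty slash-separated token not a protocol token).
def Pre_parse_linebreakless_url_str (url_str : String) : Prop :=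
  (((PySem.Chars.splitOn url_str.toList "/".toList).filter (fun t => t ≠ [])).head?.all pvIsProto) = true
instance (url_str : String) : Decidable (Pre_parse_linebreakless_url_str url_str) := by
  unfold Pre_parse_linebreakless_url_str; infer_instance

def pvWitness_parse_linebreakless_url_str : String := "http://example.com/pagehttps://foo"

def Spec_parse_linebreakless_url_str (url_str : String) (out : List String) : Prop := out = parse_linebreakless_url_str_alt url_str
instance (url_str : String) (out : List String) : Decidable (Spec_parse_linebreakless_url_str url_str out) := by unfold Spec_parse_linebreakless_url_str; infer_instance

-- ===== CLAIM (what is proved, stated in full; the proofs are below) =====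
def Claim_equal_parse_linebreakless_url_str : Prop := ∀ (url_str : String), Dom_parse_linebreakless_url_str url_str → Pre_parse_linebreakless_url_str url_str → Spec_parse_linebreakless_url_str url_str (parse_linebreakless_url_str url_str)

-- ===== LEMMAS AND PROOFS =====

-- A's final flush, as a function of the loop result
def pvFinishA : Option (PySem.Set String × List Char) → List String
  | none => []
  | some (urls, cur) =>
    if cur ≠ [] ∧ pvIsFullyBaked cur = true then PySem.Set.add urls (String.ofList cur) else urls

-- loop-shaped segment builder (proof intermediary between A's loop and pvSegments)
def pvSegsB (p b : List Char) : List (List Char) → List (List Char × List Char)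
  | [] => [(p, b)]
  | t :: r =>
    if pvIsProto t = true then (p, b) :: pvSegsB t [] r
    else pvSegsB p (b ++ t) r

-- B's set building, as a function of the segment list
def pvFinishB (urls : PySem.Set String) (gs : List (List Char × List Char)) : List String :=
  let s := gs.dropLast.foldl (fun s g => PySem.Set.add s (pvRender g)) urls
  match gs.getLast? with
  | some (q, b) => if b ≠ [] then PySem.Set.add s (String.ofList (q ++ "//".toList ++ b)) else s
  | none => s

theorem pvSegsB_ne_nil (p b : List Char) (l : List (List Char)) : pvSegsB p b l ≠ [] := by
  induction l generalizing p b with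
  | nil => simp [pvSegsB]
  | cons t r ih => simp only [pvSegsB]; split <;> simp [ih]

theorem pvLoopA_filter (l : List (List Char)) (urls : PySem.Set String) (cur : List Char) (init : Bool) :
    pvLoopA l urls cur init = pvLoopA (l.filter (fun t => t ≠ [])) urls cur init := by
  induction l generalizing urls cur init with
  | nil => rfl
  | cons t r ih =>
    by_cases ht : t = []
    · rw [List.filter_cons_of_neg (by simp [ht])]
      simp only [pvLoopA, if_pos ht]
      exact ih _ _ _
    · rw [List.filter_cons_of_pos (by simp [ht])]
      simp only [pvLoopA, if_neg ht]
      split_ifs <;> first | rfl | exact ih _ _ _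

theorem pvFinishB_cons (urls : PySem.Set String) (g : List Char × List Char)
    (gs : List (List Char × List Char)) (h : gs ≠ []) :
    pvFinishB urls (g :: gs) = pvFinishB (PySem.Set.add urls (pvRender g)) gs := by
  cases gs with
  | nil => exact absurd rfl h
  | cons g' gs' => simp [pvFinishB, List.getLast?_cons_cons]

-- core invariant: A's loop after the first protocol token computes B's segment build
theorem pvMain (rest : List (List Char)) (p b : List Char) (urls : PySem.Set String)
    (hp : pvIsProto p = true)
    (hne : ∀ t ∈ rest, t ≠ []) :
    pvFinishA (pvLoopA rest urls (p ++ "//".toList ++ b) false) = pvFinishB urls (pvSegsB p b rest) := by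
  induction rest generalizing p b urls with
  | nil =>
    simp only [pvLoopA, pvFinishA, pvSegsB, pvFinishB]
    simp only [pvIsProto, decide_eq_true_eq] at hp
    rcases hp with rfl | rfl <;> simp [pvIsFullyBaked]
  | cons t r ih =>
    have ht : t ≠ [] := hne t (by simp)
    have hne' : ∀ x ∈ r, x ≠ [] := fun x hx => hne x (by simp [hx])
    have hcur : p ++ "//".toList ++ b ≠ [] := by
      simp only [pvIsProto, decide_eq_true_eq] at hp
      rcases hp with rfl | rfl <;> simp
    cases htp : pvIsProto t with
    | true =>
      simp only [pvLoopA, pvSegsB, if_neg ht, htp, Bool.false_eq_true, Bool.true_eq_false,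
        false_and, if_false, if_true, ne_eq, hcur, not_false_eq_true]
      rw [pvFinishB_cons _ _ _ (pvSegsB_ne_nil _ _ _)]
      have harg : PySem.Set.add urls (String.ofList (p ++ "//".toList ++ b))
          = PySem.Set.add urls (pvRender (p, b)) := rfl
      rw [harg, show t ++ "//".toList = t ++ "//".toList ++ [] by simp]
      exact ih t [] _ htp hne'
    | false =>
      simp only [pvLoopA, pvSegsB, if_neg ht, htp, Bool.false_eq_true,
        false_and, if_false]
      rw [List.append_assoc (p ++ "//".toList) b t]
      exact ih p (b ++ t) urls hp hne'

-- relate the recursive-with-while form (_segments) to the loop-shaped form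
theorem pvSegsB_takeBody (rest : List (List Char)) (p b : List Char) :
    pvSegsB p b rest =
      match pvTakeBody rest with
      | (b', []) => [(p, b ++ b')]
      | (b', q :: r') => (p, b ++ b') :: pvSegsB q [] r' := by
  induction rest generalizing b with
  | nil => simp [pvSegsB, pvTakeBody]
  | cons t r ih =>
    cases htp : pvIsProto t with
    | true => simp [pvSegsB, pvTakeBody, htp]
    | false =>
      simp only [pvSegsB, pvTakeBody, htp, Bool.false_eq_true, if_false]
      rw [ih (b ++ t)]
      rcases hr : pvTakeBody r with ⟨b₁, r₁⟩
      cases r₁ <;> simp [List.append_assoc]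

theorem pvSegments_eq_segsB_aux (n : Nat) :
    ∀ (rest : List (List Char)), rest.length ≤ n → ∀ (p : List Char),
      pvSegments p rest = pvSegsB p [] rest := by
  induction n with
  | zero =>
    intro rest hlen p
    have : rest = [] := by cases rest <;> simp_all
    subst this
    rw [pvSegments]
    simp [pvTakeBody, pvSegsB]
  | succ n ihn =>
    intro rest hlen p
    rw [pvSegments, pvSegsB_takeBody]
    rcases htb : pvTakeBody rest with ⟨b', r'⟩
    cases r' with
    | nil => simp
    | cons q r'' =>
      have hl : r''.length + 1 ≤ rest.length := by
        have := pvTakeBody_len rest; rw [htb] at this; simpa using this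
      rw [dif_neg (by simp)]
      simp only [List.head_cons, List.tail_cons, List.nil_append]
      rw [ihn r'' (by omega) q]

theorem pvSegments_eq_segsB (rest : List (List Char)) (p : List Char) :
    pvSegments p rest = pvSegsB p [] rest :=
  pvSegments_eq_segsB_aux rest.length rest le_rfl p

-- ===== VERDICT (by name: the statement is the Claim_ definition above) =====
theorem parse_linebreakless_url_str_spec : Claim_equal_parse_linebreakless_url_str := by
  intro u _dom hpre
  unfold Spec_parse_linebreakless_url_str parse_linebreakless_url_str parse_linebreakless_url_str_alt
  rw [pvLoopA_filter]
  rcases hl : (PySem.Chars.splitOn u.toList "/".toList).filter (fun t => t ≠ []) with _ | ⟨p, rest⟩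
  · rfl
  · have hp : pvIsProto p = true := by
      unfold Pre_parse_linebreakless_url_str at hpre
      rw [hl] at hpre
      simpa using hpre
    have hpne : p ≠ [] := by
      intro hnil
      subst hnil
      simp [pvIsProto] at hp
    have hne : ∀ t ∈ rest, t ≠ [] := by
      intro t htm
      have : t ∈ (PySem.Chars.splitOn u.toList "/".toList).filter (fun t => t ≠ []) := by
        rw [hl]; simp [htm]
      simpa using List.of_mem_filter this
    have step : pvLoopA (p :: rest) PySem.Set.empty [] true
        = pvLoopA rest PySem.Set.empty (p ++ "//".toList ++ []) false := by
      simp [pvLoopA, hpne, hp]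
    rw [step]
    show pvFinishA _ = _
    rw [pvMain rest p [] PySem.Set.empty hp hne, ← pvSegments_eq_segsB]
    simp only [hp, Bool.true_eq_false, if_false, pvFinishB, PySem.Set.ofList_eq_foldl,
      List.foldl_map]
    rfl
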